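-- pv_equiv track=rewrite | github.com/rakesh-suru/leetcode_solutions | solutions/3751-Total-Waviness-of-Numbers-in-Range-I/sol4.py | totalWaviness
-- ===== SOURCE A (Python) =====
-- from functools import lru_cache
--
-- def totalWaviness(num1: int, num2: int) -> int:
--
--     def count_wave(num):
--
--         digits = list(map(int, str(num)))
--         n = len(digits)
--
--         @lru_cache(None)
--         def dp(i, prev1, prev2):
--
--             if i == n:
--                 return 0
--
--             ans = 0
--             curr = digits[i]
--
--             if prev2 != -1:
--
--                 if prev2 < prev1 > curr:
--                     ans += 1
--
--                 elif prev2 > prev1 < curr: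
--                     ans += 1
--
--             ans += dp(i + 1, curr, prev1)
--
--             return ans
--
--         return dp(0, -1, -1)
--
--     total = 0
--
--     for num in range(num1, num2 + 1):
--         total += count_wave(num)
--
--     return total
-- ===== SOURCE B (Python) =====
-- def totalWaviness(num1: int, num2: int) -> int:
--     def waviness(num):
--         d = [int(c) for c in str(num)]
--         return sum(1 for a, b, c in zip(d, d[1:], d[2:]) if a < b > c or a > b < c)
--     return sum(waviness(n) for n in range(num1, num2 + 1))
-- ===== Notes on version B (the rewrite author's own statement) =====
-- stated objective: simpler
-- what changed: replaces the per-number memoized recursion dp(i, prev1, prev2) with sentinel -1 values by a direct one-pass scan over consecutive digit triples (zip of d, d[1:], d[2:]) counting strict local extrema, summed over the range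
-- outside the precondition, e.g. on totalWaviness(-3, 2): A raises ValueError, B raises ValueError
import Mathlib
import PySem

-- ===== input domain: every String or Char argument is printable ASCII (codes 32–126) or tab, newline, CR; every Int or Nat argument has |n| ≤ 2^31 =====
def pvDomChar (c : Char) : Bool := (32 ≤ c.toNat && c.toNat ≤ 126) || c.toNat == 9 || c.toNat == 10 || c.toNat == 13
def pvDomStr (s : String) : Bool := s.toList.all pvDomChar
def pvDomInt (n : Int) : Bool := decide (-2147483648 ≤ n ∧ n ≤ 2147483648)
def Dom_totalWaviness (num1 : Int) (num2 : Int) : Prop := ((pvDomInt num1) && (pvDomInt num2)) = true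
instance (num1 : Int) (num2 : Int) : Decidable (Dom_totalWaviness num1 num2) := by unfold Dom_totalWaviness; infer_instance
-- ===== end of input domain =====

-- B replaces A's per-number memoized recursion dp(i, prev1, prev2) with a direct
-- one-pass count of strict local extrema over consecutive digit triples; same cost, simpler.


-- ===== PORT A =====
-- digits = list(map(int, str(num)))  — int(c) ported as (c.toNat - 48 : Nat) cast to Int,
-- exact on digit characters; Pre_ restricts to num ≥ 0 over the range, where str(num) is all digits.
def pvDigitsA (num : Int) : List Int :=
  (PySem.Int.toStr num).toList.map (fun c => ((c.toNat - 48 : Nat) : Int))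

-- dp(i, prev1, prev2), structural recursion on the remaining digit list
def pvDpA : List Int → Int → Int → Int
  | [], _, _ => 0
  | curr :: rest, prev1, prev2 =>
    (if prev2 ≠ -1 then
       (if prev2 < prev1 ∧ prev1 > curr then 1
        else if prev2 > prev1 ∧ prev1 < curr then 1
        else 0)
     else 0) + pvDpA rest curr prev1

def pvCountWaveA (num : Int) : Int := pvDpA (pvDigitsA num) (-1) (-1)

def totalWaviness (num1 : Int) (num2 : Int) : Int :=
  (PySem.List.pyRange num1 (num2 + 1) 1).foldl (fun total num => total + pvCountWaveA num) 0

-- ===== PORT B =====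
-- d = [int(c) for c in str(num)]  (same int(c) porting note as above)
def pvDigitsB (num : Int) : List Int :=
  (PySem.Int.toStr num).toList.map (fun c => ((c.toNat - 48 : Nat) : Int))

-- sum(1 for a,b,c in zip(d, d[1:], d[2:]) if a < b > c or a > b < c)
def pvWavinessB (num : Int) : Int :=
  let d := pvDigitsB num
  (((d.zip (d.drop 1)).zip (d.drop 2)).countP
    (fun p => decide ((p.1.1 < p.1.2 ∧ p.1.2 > p.2) ∨ (p.1.1 > p.1.2 ∧ p.1.2 < p.2))) : Nat)

def totalWaviness_alt (num1 : Int) (num2 : Int) : Int :=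
  ((PySem.List.pyRange num1 (num2 + 1) 1).map pvWavinessB).sum

-- ===== PRECONDITION & SPEC =====
-- Pre_ excludes exactly the inputs where Python A raises: a nonempty range containing a
-- negative number makes map(int, str(num)) hit the '-' sign and raise ValueError.
def Pre_totalWaviness (num1 : Int) (num2 : Int) : Prop := 0 ≤ num1 ∨ num2 < num1
instance (num1 : Int) (num2 : Int) : Decidable (Pre_totalWaviness num1 num2) := by unfold Pre_totalWaviness; infer_instance
def pvWitness_totalWaviness : Int × Int := (100, 130)

def Spec_totalWaviness (num1 : Int) (num2 : Int) (out : Int) : Prop := out = totalWaviness_alt num1 num2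
instance (num1 : Int) (num2 : Int) (out : Int) : Decidable (Spec_totalWaviness num1 num2 out) := by unfold Spec_totalWaviness; infer_instance

-- ===== CLAIM (what is proved, stated in full; the proofs are below) =====
def Claim_equal_totalWaviness : Prop := ∀ (num1 : Int) (num2 : Int), Dom_totalWaviness num1 num2 → Pre_totalWaviness num1 num2 → Spec_totalWaviness num1 num2 (totalWaviness num1 num2)

-- ===== LEMMAS AND PROOFS =====

-- B's triple count, on a plain digit list (pvWavinessB num = pvCnt (pvDigitsB num))
def pvCnt (d : List Int) : Int :=
  (((d.zip (d.drop 1)).zip (d.drop 2)).countP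
    (fun p => decide ((p.1.1 < p.1.2 ∧ p.1.2 > p.2) ∨ (p.1.1 > p.1.2 ∧ p.1.2 < p.2))) : Nat)

lemma pvCnt_cons (a b c : Int) (r : List Int) :
    pvCnt (a :: b :: c :: r) =
      (if (a < b ∧ b > c) ∨ (a > b ∧ b < c) then 1 else 0) + pvCnt (b :: c :: r) := by
  simp only [pvCnt, List.drop, List.zip, List.zipWith, List.countP_cons]
  push_cast
  split_ifs <;> simp_all <;> omega

lemma pvDigitsB_nonneg (num : Int) : ∀ x ∈ pvDigitsB num, 0 ≤ x := by
  intro x hx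
  simp only [pvDigitsB, List.mem_map] at hx
  obtain ⟨c, -, rfl⟩ := hx
  exact Int.natCast_nonneg _

lemma pvDpA_eq_pvCnt : ∀ (l : List Int) (p1 p2 : Int), 0 ≤ p1 → 0 ≤ p2 →
    (∀ x ∈ l, 0 ≤ x) → pvDpA l p1 p2 = pvCnt (p2 :: p1 :: l) := by
  intro l
  induction l with
  | nil => intro p1 p2 _ _ _; simp [pvDpA, pvCnt]
  | cons curr rest ih =>
    intro p1 p2 h1 h2 hl
    have hcurr : 0 ≤ curr := hl curr (by simp)
    have hrest : ∀ x ∈ rest, 0 ≤ x := fun x hx => hl x (by simp [hx])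
    rw [pvCnt_cons]
    simp only [pvDpA]
    rw [ih curr p1 hcurr h1 hrest]
    have hne : p2 ≠ -1 := by omega
    simp only [hne, if_true, ne_eq, not_false_iff]
    split_ifs <;> omega

lemma pvCountWaveA_eq (num : Int) : pvCountWaveA num = pvWavinessB num := by
  have hd : pvDigitsA num = pvDigitsB num := rfl
  have hw : pvWavinessB num = pvCnt (pvDigitsB num) := rfl
  rw [pvCountWaveA, hd, hw]
  rcases hdig : pvDigitsB num with _ | ⟨a, _ | ⟨b, rest⟩⟩
  · simp [pvDpA, pvCnt]
  · simp [pvDpA, pvCnt]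
  · have hnn := pvDigitsB_nonneg num
    rw [hdig] at hnn
    have ha : 0 ≤ a := hnn a (by simp)
    have hb : 0 ≤ b := hnn b (by simp)
    have hrest : ∀ x ∈ rest, 0 ≤ x := fun x hx => hnn x (by simp [hx])
    simp only [pvDpA, ne_eq, not_true_eq_false, if_false]
    rw [pvDpA_eq_pvCnt rest b a hb ha hrest]
    omega

lemma pvFoldl_eq_sum : ∀ (l : List Int) (acc : Int),
    l.foldl (fun total num => total + pvCountWaveA num) acc = acc + (l.map pvWavinessB).sum := by
  intro l
  induction l with
  | nil => intro acc; simp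
  | cons x xs ih =>
    intro acc
    rw [List.foldl_cons, ih, List.map_cons, List.sum_cons, pvCountWaveA_eq]
    ring

-- ===== VERDICT (by name: the statement is the Claim_ definition above) =====
theorem totalWaviness_spec : Claim_equal_totalWaviness := by
  intro num1 num2 _ _
  unfold Spec_totalWaviness totalWaviness totalWaviness_alt
  rw [pvFoldl_eq_sum]
  ring
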